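-- pv_equiv track=rewrite | github.com/piwoori/CT | PG/level0/_181929/PG181929.py | solution
-- ===== SOURCE A (Python) =====
-- def solution(num_list):
--     sum1 = 0
--     mul = 1
--     for i in num_list:
--         sum1 += i
--         mul *= i
--
--     if (sum1 ** 2 > mul): return 1
--     else: return 0
-- ===== SOURCE B (Python) =====
-- def _agg(xs):
--     # (sum, product) of xs by divide and conquer
--     n = len(xs)
--     if n == 0:
--         return (0, 1)
--     if n == 1:
--         return (xs[0], xs[0])
--     m = n // 2
--     s1, p1 = _agg(xs[:m])
--     s2, p2 = _agg(xs[m:])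
--     return (s1 + s2, p1 * p2)
--
-- def solution(num_list):
--     s, p = _agg(num_list)
--     return 1 if s * s > p else 0
-- ===== Notes on version B (the rewrite author's own statement) =====
-- stated objective: faster
-- what changed: Replaces A's single fused left-to-right loop with a divide-and-conquer reduction: the list is split in halves recursively, each half yields its (sum, product), and the pairs are combined bottom-up before the strict comparison s*s > p.
import Mathlib
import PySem

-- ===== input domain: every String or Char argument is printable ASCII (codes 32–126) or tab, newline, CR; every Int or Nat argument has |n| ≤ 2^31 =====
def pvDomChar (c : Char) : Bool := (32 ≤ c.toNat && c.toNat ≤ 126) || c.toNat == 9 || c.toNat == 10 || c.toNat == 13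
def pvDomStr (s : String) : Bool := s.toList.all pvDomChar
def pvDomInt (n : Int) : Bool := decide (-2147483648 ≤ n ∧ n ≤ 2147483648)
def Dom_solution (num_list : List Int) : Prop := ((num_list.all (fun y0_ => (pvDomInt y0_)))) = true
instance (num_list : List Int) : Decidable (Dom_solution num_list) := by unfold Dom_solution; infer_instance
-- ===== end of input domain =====

-- B replaces A's single fused loop with a divide-and-conquer (recursive halving) reduction; same return value.

-- ===== PORT A =====
def solution (num_list : List Int) : Int :=
  let sp := num_list.foldl (fun (acc : Int × Int) i => (acc.1 + i, acc.2 * i)) (0, 1)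
  if sp.1 ^ 2 > sp.2 then 1 else 0

-- ===== PORT B =====
def agg : List Int → Int × Int
  | [] => (0, 1)
  | [x] => (x, x)
  | x :: y :: t =>
      let m := (x :: y :: t).length / 2
      let l := agg ((x :: y :: t).take m)
      let r := agg ((x :: y :: t).drop m)
      (l.1 + r.1, l.2 * r.2)
termination_by xs => xs.length
decreasing_by
  · simp [List.length_take]; omega
  · simp; omega

def solution_alt (num_list : List Int) : Int :=
  let sp := agg num_list
  if sp.1 * sp.1 > sp.2 then 1 else 0

-- ===== PRECONDITION & SPEC =====
def Spec_solution (num_list : List Int) (out : Int) : Prop := out = solution_alt num_list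
instance (num_list : List Int) (out : Int) : Decidable (Spec_solution num_list out) := by unfold Spec_solution; infer_instance

-- ===== CLAIM (what is proved, stated in full; the proofs are below) =====
def Claim_equal_solution : Prop := ∀ (num_list : List Int), Dom_solution num_list → Spec_solution num_list (solution num_list)

-- ===== LEMMAS AND PROOFS =====
theorem agg_eq (xs : List Int) : agg xs = (xs.sum, xs.prod) := by
  fun_induction agg with
  | case1 => simp
  | case2 x => simp
  | case3 x y t m l r ih2 ih1 =>
      simp only [m, l, r, ih2, ih1]
      rw [show (x :: y :: t).sum
            = ((x :: y :: t).take ((x :: y :: t).length / 2)).sum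
              + ((x :: y :: t).drop ((x :: y :: t).length / 2)).sum by
            rw [← List.sum_append, List.take_append_drop],
          show (x :: y :: t).prod
            = ((x :: y :: t).take ((x :: y :: t).length / 2)).prod
              * ((x :: y :: t).drop ((x :: y :: t).length / 2)).prod by
            rw [← List.prod_append, List.take_append_drop]]

theorem foldl_pair_eq (xs : List Int) (a b : Int) :
    xs.foldl (fun (acc : Int × Int) i => (acc.1 + i, acc.2 * i)) (a, b)
      = (a + xs.sum, b * xs.prod) := by
  induction xs generalizing a b with
  | nil => simp
  | cons x xs ih =>
      rw [List.foldl_cons, ih]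
      simp only [List.sum_cons, List.prod_cons, Prod.mk.injEq]
      constructor <;> ring

-- ===== VERDICT (by name: the statement is the Claim_ definition above) =====
theorem solution_spec : Claim_equal_solution := by
  intro num_list _
  unfold Spec_solution solution solution_alt
  rw [foldl_pair_eq, agg_eq]
  simp [pow_two]
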